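-- pv_equiv track=rewrite | github.com/Venkataramana-Baratam/GFG-SOLUTIONS | Difficulty: Easy/Largest number in one swap/largest-number-in-one-swap.py | largestSwap
-- ===== SOURCE A (Python) =====
-- def largestSwap(s):
--     res = list(s)
--     for i in range(len(res)):
--         target_idx = i
--         for j in range(len(res) - 1, i, -1):
--             if res[j] > res[target_idx]:
--                 target_idx = j
--
--         if target_idx != i:
--             res[i], res[target_idx] = res[target_idx], res[i]
--             return "".join(res)
--     return s
-- ===== SOURCE B (Python) =====
-- def largestSwap(s):
--     n = len(s)
--     best = []          # after reverse: best[i] = index of the max of s[i:], rightmost on ties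
--     bi = n - 1
--     for i in range(n - 1, -1, -1):
--         if s[i] > s[bi]:
--             bi = i
--         best.append(bi)
--     best.reverse()
--     for i in range(n - 1):
--         j = best[i + 1]
--         if s[j] > s[i]:
--             return s[:i] + s[j] + s[i + 1:j] + s[i] + s[j + 1:]
--     return s
-- ===== Notes on version B (the rewrite author's own statement) =====
-- stated objective: faster
-- what changed: A rescans the whole suffix for its maximum at every outer index (quadratic); B precomputes the rightmost suffix-argmax table in one right-to-left pass and then finds the swap position in a single left-to-right pass, building the result with slices.
import Mathlib
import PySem

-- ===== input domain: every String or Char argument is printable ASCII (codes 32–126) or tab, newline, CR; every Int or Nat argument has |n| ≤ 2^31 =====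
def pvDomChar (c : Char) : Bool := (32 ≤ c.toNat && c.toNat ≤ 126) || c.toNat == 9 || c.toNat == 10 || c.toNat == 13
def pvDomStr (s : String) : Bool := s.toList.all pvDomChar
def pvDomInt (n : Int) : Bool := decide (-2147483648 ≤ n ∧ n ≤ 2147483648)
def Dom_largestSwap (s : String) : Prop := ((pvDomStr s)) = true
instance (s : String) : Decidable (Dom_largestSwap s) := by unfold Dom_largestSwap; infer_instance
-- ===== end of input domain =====

-- B replaces A's quadratic inner rescans by a precomputed suffix-argmax table and a single
-- left-to-right pass (objective: faster); return values agree on every input.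

-- ===== PORT A =====
-- inner loop: for j in range(len(res)-1, i, -1): if res[j] > res[target_idx]: target_idx = j
-- (every index evaluated is in range, so the total pyGetD form is exact)
def largestSwapInner (res : List Char) (i : Int) : Int :=
  (PySem.List.pyRange ((res.length : Int) - 1) i (-1)).foldl
    (fun t j => if PySem.List.pyGetD res t ' ' < PySem.List.pyGetD res j ' ' then j else t) i

-- outer loop: for i in range(len(res)): … early return on the first swap, else fall through to s
def largestSwapLoop (s : String) (res : List Char) (i : Nat) : String :=
  if _h : i < res.length then
    let t := largestSwapInner res (i : Int)
    if t ≠ (i : Int) then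
      -- res[i], res[t] = res[t], res[i]; return "".join(res)
      String.ofList (PySem.List.pySetD (PySem.List.pySetD res (i : Int) (PySem.List.pyGetD res t ' '))
        t (PySem.List.pyGetD res (i : Int) ' '))
    else largestSwapLoop s res (i + 1)
  else s
termination_by res.length - i

def largestSwap (s : String) : String := largestSwapLoop s s.toList 0

-- ===== PORT B =====
-- second loop: for i in range(n-1): j = best[i+1]; if s[j] > s[i]: return the sliced swap
-- (string slicing and + done on the character list; String.ofList re-joins, which is exact)
def largestSwapAltLoop (s : String) (sl : List Char) (best : List Int) (i : Nat) : String :=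
  if _h : i + 1 < sl.length then
    let j := PySem.List.pyGetD best ((i : Int) + 1) 0
    if PySem.List.pyGetD sl (i : Int) ' ' < PySem.List.pyGetD sl j ' ' then
      String.ofList (PySem.List.slice sl none (some (i : Int)) ++ [PySem.List.pyGetD sl j ' ']
        ++ PySem.List.slice sl (some ((i : Int) + 1)) (some j) ++ [PySem.List.pyGetD sl (i : Int) ' ']
        ++ PySem.List.slice sl (some (j + 1)) none)
    else largestSwapAltLoop s sl best (i + 1)
  else s
termination_by sl.length - i

-- first loop: for i in range(n-1, -1, -1): if s[i] > s[bi]: bi = i; best.append(bi); best.reverse()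
def largestSwap_alt (s : String) : String :=
  let sl := s.toList
  let n : Int := sl.length
  let st := (PySem.List.pyRange (n - 1) (-1) (-1)).foldl
    (fun (st : Int × List Int) i =>
      let bi := if PySem.List.pyGetD sl st.1 ' ' < PySem.List.pyGetD sl i ' ' then i else st.1
      (bi, st.2 ++ [bi]))
    (n - 1, [])
  largestSwapAltLoop s sl st.2.reverse 0

-- ===== PRECONDITION & SPEC =====
def Spec_largestSwap (s : String) (out : String) : Prop := out = largestSwap_alt s
instance (s : String) (out : String) : Decidable (Spec_largestSwap s out) := by unfold Spec_largestSwap; infer_instance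

-- ===== CLAIM (what is proved, stated in full; the proofs are below) =====
def Claim_equal_largestSwap : Prop := ∀ (s : String), Dom_largestSwap s → Spec_largestSwap s (largestSwap s)

-- ===== LEMMAS AND PROOFS =====

-- rightmost index of the maximum character of l[k:], the quantity both loops maintain
def bestIdx (l : List Char) (k : Nat) : Nat :=
  if _h : k + 1 < l.length then
    let b := bestIdx l (k + 1)
    if l.getD b ' ' < l.getD k ' ' then k else b
  else k
termination_by l.length - k

lemma bestIdx_last (l : List Char) (k : Nat) (h : ¬ k + 1 < l.length) : bestIdx l k = k := by
  unfold bestIdx; simp [h]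

lemma bestIdx_bounds (l : List Char) (k : Nat) (hk : k < l.length) :
    k ≤ bestIdx l k ∧ bestIdx l k < l.length := by
  by_cases h : k + 1 < l.length
  · have ih := bestIdx_bounds l (k + 1) h
    unfold bestIdx
    simp only [dif_pos h]
    split <;> omega
  · rw [bestIdx_last l k h]; omega
termination_by l.length - k

-- split the last element (smallest index) off A's countdown range
lemma pyRange_countdown_split (n k : Nat) (h : k + 1 < n) :
    PySem.List.pyRange ((n : Int) - 1) (k : Int) (-1)
      = PySem.List.pyRange ((n : Int) - 1) ((k : Int) + 1) (-1) ++ [(k : Int) + 1] := by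
  rw [PySem.List.pyRange_neg_one_eq_reverse, PySem.List.pyRange_neg_one_eq_reverse,
    PySem.List.pyRange_one_cons (by omega)]
  simp

-- characterisation of A's inner fold, for any start value t
lemma G_spec (l : List Char) (k t : Nat) (hk : k < l.length) (ht : t < l.length) :
    (PySem.List.pyRange ((l.length : Int) - 1) (k : Int) (-1)).foldl
      (fun t j => if PySem.List.pyGetD l t ' ' < PySem.List.pyGetD l j ' ' then j else t) (t : Int)
    = if k + 1 < l.length then
        (if l.getD t ' ' < l.getD (bestIdx l (k + 1)) ' ' then ((bestIdx l (k + 1) : Nat) : Int) else (t : Int))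
      else (t : Int) := by
  by_cases h : k + 1 < l.length
  · have ih := G_spec l (k + 1) t h ht
    have hc : ((k : Int) + 1) = ((k + 1 : Nat) : Int) := by push_cast; ring
    rw [← hc] at ih
    rw [pyRange_countdown_split l.length k h, List.foldl_append, ih, if_pos h]
    by_cases h2 : (k + 1) + 1 < l.length
    · have hB : bestIdx l (k + 1)
          = if l.getD (bestIdx l (k + 2)) ' ' < l.getD (k + 1) ' ' then k + 1 else bestIdx l (k + 2) := by
        conv_lhs => rw [bestIdx]
        simp only [dif_pos h2]
      rw [if_pos h2, hB]
      rcases lt_or_ge (l.getD t ' ') (l.getD (bestIdx l (k + 2)) ' ') with c2 | c2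
      · rw [if_pos c2]
        simp only [List.foldl_cons, List.foldl_nil, hc, PySem.List.pyGetD_natCast]
        rcases lt_or_ge (l.getD (bestIdx l (k + 2)) ' ') (l.getD (k + 1) ' ') with c1 | c1
        · simp only [if_pos c1]
          rw [if_pos (lt_trans c2 c1)]
        · simp only [if_neg (not_lt.mpr c1)]
          rw [if_pos c2]
      · rw [if_neg (not_lt.mpr c2)]
        simp only [List.foldl_cons, List.foldl_nil, hc, PySem.List.pyGetD_natCast]
        rcases lt_or_ge (l.getD (bestIdx l (k + 2)) ' ') (l.getD (k + 1) ' ') with c1 | c1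
        · simp only [if_pos c1]
        · simp only [if_neg (not_lt.mpr c1)]
          rw [if_neg (not_lt.mpr c2), if_neg (not_lt.mpr (le_trans c1 c2))]
    · have hB : bestIdx l (k + 1) = k + 1 := bestIdx_last l (k + 1) h2
      rw [if_neg h2, hB]
      simp only [List.foldl_cons, List.foldl_nil, hc, PySem.List.pyGetD_natCast]
  · have hk1 : k = l.length - 1 := by omega
    have : PySem.List.pyRange ((l.length : Int) - 1) (k : Int) (-1) = [] := by
      apply PySem.List.pyRange_neg_one_eq_nil; omega
    rw [this, if_neg h]
    rfl
termination_by l.length - k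

lemma innerA_eq (l : List Char) (i : Nat) (hi : i < l.length) :
    largestSwapInner l (i : Int)
    = if i + 1 < l.length then
        (if l.getD i ' ' < l.getD (bestIdx l (i + 1)) ' ' then ((bestIdx l (i + 1) : Nat) : Int) else (i : Int))
      else (i : Int) := by
  unfold largestSwapInner
  exact G_spec l i i hi hi

-- the swapped list exactly as A writes it equals the slice concatenation B writes
lemma swap_eq_slices (l : List Char) (i b : Nat) (a c : Char) (hib : i < b) (hb : b < l.length) :
    (l.set i a).set b c
    = l.take i ++ [a] ++ (l.drop (i + 1)).take (b - (i + 1)) ++ [c] ++ l.drop (b + 1) := by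
  rw [List.set_eq_take_cons_drop a (by omega : i < l.length)]
  rw [List.set_append_right _ _ (by simp; omega)]
  have hlen : (l.take i).length = i := by simp; omega
  rw [hlen]
  have hbi : b - i = (b - i - 1) + 1 := by omega
  rw [hbi, List.set_cons_succ]
  rw [List.set_eq_take_cons_drop c (by simp; omega : b - i - 1 < (l.drop (i+1)).length)]
  rw [List.drop_drop]
  have h2 : (i + 1) + (b - i - 1 + 1) = b + 1 := by omega
  have h1 : b - i - 1 = b - (i + 1) := by omega
  rw [h2, h1]
  simp [List.append_assoc]

-- B's first fold fills best with the bestIdx values, newest first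
lemma foldB (l : List Char) (k : Nat) (acc : List Int) (hk : k < l.length) :
    (PySem.List.pyRange ((k : Int) - 1) (-1) (-1)).foldl
      (fun (st : Int × List Int) i =>
        (if PySem.List.pyGetD l st.1 ' ' < PySem.List.pyGetD l i ' ' then i else st.1,
         st.2 ++ [if PySem.List.pyGetD l st.1 ' ' < PySem.List.pyGetD l i ' ' then i else st.1]))
      (((bestIdx l k : Nat) : Int), acc)
    = (((bestIdx l 0 : Nat) : Int),
       acc ++ (List.range k).reverse.map (fun j => ((bestIdx l j : Nat) : Int))) := by
  induction k generalizing acc with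
  | zero =>
    have hnil : PySem.List.pyRange ((0 : Int) - 1) (-1) (-1) = [] :=
      PySem.List.pyRange_neg_one_eq_nil (by omega)
    norm_num [hnil]
  | succ k ih =>
    have hcons : PySem.List.pyRange (((k + 1 : Nat) : Int) - 1) (-1) (-1)
        = ((k : Nat) : Int) :: PySem.List.pyRange ((k : Int) - 1) (-1) (-1) := by
      have h1 : (((k + 1 : Nat) : Int) - 1) = ((k : Nat) : Int) := by push_cast; ring
      rw [h1]
      exact PySem.List.pyRange_neg_one_cons (by omega)
    rw [hcons, List.foldl_cons]
    have hstep : (if PySem.List.pyGetD l (((bestIdx l (k+1) : Nat) : Int)) ' '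
            < PySem.List.pyGetD l ((k : Nat) : Int) ' ' then ((k : Nat) : Int)
          else ((bestIdx l (k+1) : Nat) : Int))
        = ((bestIdx l k : Nat) : Int) := by
      simp only [PySem.List.pyGetD_natCast]
      conv_rhs => rw [bestIdx]
      simp only [dif_pos hk]
      split_ifs <;> rfl
    simp only [hstep]
    rw [ih _ (by omega)]
    simp [List.range_succ]

-- the two loops agree for every start index, given the filled best table
lemma loops_eq (s : String) (l : List Char) (i : Nat) :
    largestSwapLoop s l i
    = largestSwapAltLoop s l ((List.range l.length).map (fun j => ((bestIdx l j : Nat) : Int))) i := by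
  by_cases hi : i < l.length
  · rw [largestSwapLoop]
    simp only [dif_pos hi]
    rw [innerA_eq l i hi]
    by_cases h1 : i + 1 < l.length
    · rw [if_pos h1]
      have hbb := bestIdx_bounds l (i + 1) h1
      have hj : PySem.List.pyGetD ((List.range l.length).map (fun j => ((bestIdx l j : Nat) : Int)))
            ((i : Int) + 1) 0 = ((bestIdx l (i + 1) : Nat) : Int) := by
        have hc : ((i : Int) + 1) = (((i + 1 : Nat) : Nat) : Int) := by push_cast; ring
        rw [hc, PySem.List.pyGetD_natCast]
        exact PySem.List.getD_map_range _ _ _ 0 h1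
      by_cases h2 : l.getD i ' ' < l.getD (bestIdx l (i + 1)) ' '
      · rw [if_pos h2]
        rw [if_pos (show ((bestIdx l (i + 1) : Nat) : Int) ≠ (i : Int) by
          intro hcon; have : bestIdx l (i + 1) = i := by exact_mod_cast hcon
          omega)]
        rw [largestSwapAltLoop]
        simp only [dif_pos h1, hj]
        rw [if_pos (by simpa using h2)]
        congr 1
        simp only [PySem.List.pyGetD_natCast]
        rw [PySem.List.pySetD_natCast]
        rw [show ((bestIdx l (i+1) : Nat) : Int) = (((bestIdx l (i+1) : Nat) : Nat) : Int) from rfl,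
          PySem.List.pySetD_natCast]
        rw [PySem.List.slice_to_natCast]
        rw [show ((i : Int) + 1) = (((i + 1 : Nat) : Nat) : Int) by push_cast; ring]
        rw [PySem.List.slice_natCast]
        rw [show ((bestIdx l (i+1) : Nat) : Int) + 1 = (((bestIdx l (i+1) + 1 : Nat) : Nat) : Int) by push_cast; ring]
        rw [PySem.List.slice_from_natCast]
        rw [swap_eq_slices l i (bestIdx l (i+1)) _ _ (by omega) (by omega)]
      · rw [if_neg h2, if_neg (by simp)]
        rw [largestSwapAltLoop]
        simp only [dif_pos h1, hj]
        rw [if_neg (by simpa using h2)]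
        exact loops_eq s l (i + 1)
    · rw [if_neg h1, if_neg (by simp)]
      rw [largestSwapLoop, largestSwapAltLoop]
      simp only [dif_neg (show ¬ i + 1 < l.length from h1)]
  · rw [largestSwapLoop, largestSwapAltLoop]
    simp only [dif_neg hi, dif_neg (show ¬ i + 1 < l.length by omega)]
termination_by l.length - i

-- ===== VERDICT (by name: the statement is the Claim_ definition above) =====
theorem largestSwap_spec : Claim_equal_largestSwap := by
  intro s _
  unfold Spec_largestSwap largestSwap largestSwap_alt
  set l := s.toList with hl
  simp only []
  by_cases hn : l.length = 0
  · rw [largestSwapLoop, largestSwapAltLoop]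
    simp [hn]
  · have hpos : 1 ≤ l.length := by omega
    have hcons : PySem.List.pyRange ((l.length : Int) - 1) (-1) (-1)
        = ((l.length - 1 : Nat) : Int) :: PySem.List.pyRange (((l.length - 1 : Nat) : Int) - 1) (-1) (-1) := by
      have h1 : ((l.length : Int) - 1) = ((l.length - 1 : Nat) : Int) := by push_cast [hpos]; ring
      rw [h1]
      exact PySem.List.pyRange_neg_one_cons (by omega)
    have hlast : bestIdx l (l.length - 1) = l.length - 1 := bestIdx_last l _ (by omega)
    have hfirst : ((l.length : Int) - 1) = ((bestIdx l (l.length - 1) : Nat) : Int) := by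
      rw [hlast]; push_cast [hpos]; ring
    rw [hcons]
    simp only [List.foldl_cons]
    have hstep : (if PySem.List.pyGetD l ((l.length : Int) - 1) ' '
            < PySem.List.pyGetD l ((l.length - 1 : Nat) : Int) ' ' then ((l.length - 1 : Nat) : Int)
          else ((l.length : Int) - 1))
        = ((bestIdx l (l.length - 1) : Nat) : Int) := by
      have he : ((l.length : Int) - 1) = ((l.length - 1 : Nat) : Int) := by push_cast [hpos]; ring
      rw [he, hlast]
      simp
    simp only [hstep, List.nil_append]
    rw [foldB l (l.length - 1) _ (by omega)]
    have hbest : ([((bestIdx l (l.length - 1) : Nat) : Int)] ++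
          (List.range (l.length - 1)).reverse.map (fun j => ((bestIdx l j : Nat) : Int))).reverse
        = (List.range l.length).map (fun j => ((bestIdx l j : Nat) : Int)) := by
      conv_rhs => rw [show l.length = (l.length - 1) + 1 by omega, List.range_succ]
      simp
    rw [hbest]
    exact loops_eq s l 0
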